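-- pv_equiv track=rewrite | github.com/caalma/sublime-text-package_utiles | utiles-sublime-package/textcmd-tiempos.py | sumar_tiempos
-- ===== SOURCE A (Python) =====
-- def sumar_tiempos(t):
--     lin = t.strip().split('\n')
--     dat = [l.strip().split(' ') for l in lin]
--     elem = { 'h': [], 'm': [], 's': []}
--     for tie in dat:
--         for el in tie:
--             try:
--                 elem[el[-1]].append(int(el[0:-1]))
--             except Exception as e:
--                 return '!ERROR de formato!'
--     t_se = sum(elem['s'])
--     segu = t_se % 60
--     t_mi = sum(elem['m']) + (t_se // 60)
--     minu = t_mi % 60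
--     hora = sum(elem['h']) + (t_mi // 60)
--     res = '{:02}h {:02}m {:02}s'.format(hora, minu, segu)
--     return res
-- ===== SOURCE B (Python) =====
-- def sumar_tiempos(t):
--     MULT = {'h': 3600, 'm': 60, 's': 1}
--     total = 0
--     for lin in t.strip().split('\n'):
--         for el in lin.strip().split(' '):
--             try:
--                 total += int(el[0:-1]) * MULT[el[-1]]
--             except Exception as e:
--                 return '!ERROR de formato!'
--     hora, rem = divmod(total, 3600)
--     minu, segu = divmod(rem, 60)
--     return '{:02}h {:02}m {:02}s'.format(hora, minu, segu)
-- ===== Notes on version B (the rewrite author's own statement) =====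
-- stated objective: simpler
-- what changed: Replaces A's dict of three unit lists plus staged %60 and //60 carry arithmetic with a single running total in seconds (unit multipliers h=3600, m=60, s=1) that is decomposed once at the end with divmod.
import Mathlib
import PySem

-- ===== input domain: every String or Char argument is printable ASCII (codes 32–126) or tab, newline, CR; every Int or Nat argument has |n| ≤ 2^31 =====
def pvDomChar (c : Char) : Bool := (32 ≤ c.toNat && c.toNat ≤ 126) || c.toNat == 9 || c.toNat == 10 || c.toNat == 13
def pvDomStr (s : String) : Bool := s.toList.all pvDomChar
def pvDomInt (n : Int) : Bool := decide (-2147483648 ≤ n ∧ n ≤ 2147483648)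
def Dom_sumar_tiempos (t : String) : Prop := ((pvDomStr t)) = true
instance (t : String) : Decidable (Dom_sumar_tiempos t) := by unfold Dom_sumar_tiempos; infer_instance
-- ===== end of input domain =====

-- B replaces A's dict-of-lists plus staged %60 // 60 carries by one running total in
-- seconds (unit multipliers h=3600/m=60/s=1) decomposed at the end with divmod: simpler.

-- shared helpers: s.split(sep) for a non-empty literal sep, and '{:02}'.format(n)
def pvSplit (s sep : String) : List String := (PySem.Str.split? s sep).getD []
def pvFmt02 (n : Int) : String := PySem.Str.zfill (PySem.Int.toStr n) 2

-- ===== PORT A =====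
-- the inner 'for el in tie' loop; 'none' = the try/except caught an exception
def pvAInner : List String → PySem.Dict String (List Int) → Option (PySem.Dict String (List Int))
  | [], d => some d
  | el :: es, d =>
    match PySem.Str.pyGet? el (-1) with          -- el[-1] (IndexError → except)
    | none => none
    | some c =>
      match d.get? (String.ofList [c]) with      -- elem[el[-1]] (KeyError → except)
      | none => none
      | some lst =>
        match PySem.Int.ofStr? (PySem.Str.slice el (some 0) (some (-1))) with  -- int(el[0:-1])
        | none => none
        | some v => pvAInner es (d.insert (String.ofList [c]) (lst ++ [v]))

-- the outer 'for tie in dat' loop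
def pvAOuter : List (List String) → PySem.Dict String (List Int) → Option (PySem.Dict String (List Int))
  | [], d => some d
  | tie :: rest, d =>
    match pvAInner tie d with
    | none => none
    | some d' => pvAOuter rest d'

def sumar_tiempos (t : String) : String :=
  let lin := pvSplit (PySem.Str.strip t) "\n"
  let dat := lin.map (fun l => pvSplit (PySem.Str.strip l) " ")
  match pvAOuter dat (PySem.Dict.ofList [("h", ([] : List Int)), ("m", []), ("s", [])]) with
  | none => "!ERROR de formato!"
  | some elem =>
    let t_se := (elem.getD "s" []).sum
    let segu := PySem.Int.mod t_se 60
    let t_mi := (elem.getD "m" []).sum + PySem.Int.floordiv t_se 60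
    let minu := PySem.Int.mod t_mi 60
    let hora := (elem.getD "h" []).sum + PySem.Int.floordiv t_mi 60
    pvFmt02 hora ++ "h " ++ pvFmt02 minu ++ "m " ++ pvFmt02 segu ++ "s"

-- ===== PORT B =====
def pvMULT : PySem.Dict String Int := PySem.Dict.ofList [("h", 3600), ("m", 60), ("s", 1)]

-- 'for el in lin.strip().split(' ')' accumulating into total; 'none' = the except branch
def pvBInner : List String → Int → Option Int
  | [], total => some total
  | el :: es, total =>
    match PySem.Int.ofStr? (PySem.Str.slice el (some 0) (some (-1))) with  -- int(el[0:-1])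
    | none => none
    | some v =>
      match PySem.Str.pyGet? el (-1) with        -- el[-1]
      | none => none
      | some c =>
        match pvMULT.get? (String.ofList [c]) with   -- MULT[el[-1]]
        | none => none
        | some m => pvBInner es (total + v * m)

-- 'for lin in t.strip().split('\n')'
def pvBOuter : List String → Int → Option Int
  | [], total => some total
  | lin :: rest, total =>
    match pvBInner (pvSplit (PySem.Str.strip lin) " ") total with
    | none => none
    | some total' => pvBOuter rest total'

def sumar_tiempos_alt (t : String) : String :=
  match pvBOuter (pvSplit (PySem.Str.strip t) "\n") 0 with
  | none => "!ERROR de formato!"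
  | some total =>
    let hora := PySem.Int.floordiv total 3600
    let rem := PySem.Int.mod total 3600
    let minu := PySem.Int.floordiv rem 60
    let segu := PySem.Int.mod rem 60
    pvFmt02 hora ++ "h " ++ pvFmt02 minu ++ "m " ++ pvFmt02 segu ++ "s"

-- ===== PRECONDITION & SPEC =====
def Spec_sumar_tiempos (t : String) (out : String) : Prop := out = sumar_tiempos_alt t
instance (t : String) (out : String) : Decidable (Spec_sumar_tiempos t out) := by unfold Spec_sumar_tiempos; infer_instance

-- ===== CLAIM (what is proved, stated in full; the proofs are below) =====
def Claim_equal_sumar_tiempos : Prop := ∀ (t : String), Dom_sumar_tiempos t → Spec_sumar_tiempos t (sumar_tiempos t)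

-- ===== LEMMAS AND PROOFS =====

-- A's dict state is always {'h': hs, 'm': ms, 's': ss}
def pvSt (hs ms ss : List Int) : PySem.Dict String (List Int) :=
  PySem.Dict.ofList [("h", hs), ("m", ms), ("s", ss)]

-- the total B carries for that state
def pvTot (hs ms ss : List Int) : Int := 3600 * hs.sum + 60 * ms.sum + ss.sum

theorem pv_beq_h_false (c : Char) (h : ¬ c = 'h') : (("h" : String) == String.ofList [c]) = false := by
  rw [beq_eq_false_iff_ne]; intro heq
  have h2 := congrArg String.toList heq; simp at h2; exact h h2.symm

theorem pv_beq_m_false (c : Char) (h : ¬ c = 'm') : (("m" : String) == String.ofList [c]) = false := by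
  rw [beq_eq_false_iff_ne]; intro heq
  have h2 := congrArg String.toList heq; simp at h2; exact h h2.symm

theorem pv_beq_s_false (c : Char) (h : ¬ c = 's') : (("s" : String) == String.ofList [c]) = false := by
  rw [beq_eq_false_iff_ne]; intro heq
  have h2 := congrArg String.toList heq; simp at h2; exact h h2.symm

theorem pvSt_items (hs ms ss : List Int) : (pvSt hs ms ss).items = [("h", hs), ("m", ms), ("s", ss)] := rfl

theorem pvSt_get? (hs ms ss : List Int) (c : Char) :
    (pvSt hs ms ss).get? (String.ofList [c]) =
      if c = 'h' then some hs else if c = 'm' then some ms else if c = 's' then some ss else none := by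
  by_cases h1 : c = 'h'
  · subst h1; rfl
  · by_cases h2 : c = 'm'
    · subst h2; rfl
    · by_cases h3 : c = 's'
      · subst h3; rfl
      · simp [PySem.Dict.get?, pvSt_items, List.find?, pv_beq_h_false c h1, pv_beq_m_false c h2,
          pv_beq_s_false c h3, h1, h2, h3]

theorem pvMULT_items : pvMULT.items = [("h", 3600), ("m", 60), ("s", 1)] := rfl

theorem pvMULT_get? (c : Char) :
    pvMULT.get? (String.ofList [c]) =
      if c = 'h' then some 3600 else if c = 'm' then some 60 else if c = 's' then some 1 else none := by
  by_cases h1 : c = 'h'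
  · subst h1; rfl
  · by_cases h2 : c = 'm'
    · subst h2; rfl
    · by_cases h3 : c = 's'
      · subst h3; rfl
      · simp [PySem.Dict.get?, pvMULT_items, pv_beq_h_false c h1,
          pv_beq_m_false c h2, pv_beq_s_false c h3, h1, h2, h3]

theorem pvSt_get_h (hs ms ss : List Int) : (pvSt hs ms ss).get? "h" = some hs := rfl
theorem pvSt_get_m (hs ms ss : List Int) : (pvSt hs ms ss).get? "m" = some ms := rfl
theorem pvSt_get_s (hs ms ss : List Int) : (pvSt hs ms ss).get? "s" = some ss := rfl
theorem pvMULT_get_h : pvMULT.get? "h" = some 3600 := rfl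
theorem pvMULT_get_m : pvMULT.get? "m" = some 60 := rfl
theorem pvMULT_get_s : pvMULT.get? "s" = some 1 := rfl

theorem pvSt_ins_h (hs ms ss l : List Int) : (pvSt hs ms ss).insert "h" l = pvSt l ms ss := rfl
theorem pvSt_ins_m (hs ms ss l : List Int) : (pvSt hs ms ss).insert "m" l = pvSt hs l ss := rfl
theorem pvSt_ins_s (hs ms ss l : List Int) : (pvSt hs ms ss).insert "s" l = pvSt hs ms l := rfl

-- an empty token: el[-1] raised, and int(el[0:-1]) = int('') raises too
theorem pv_empty_tok (el : String) (hg : PySem.List.pyGet? el.toList (-1) = none) :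
    PySem.Int.ofStr? (PySem.Str.slice el (some 0) (some (-1))) = none := by
  have hnil : el.toList = [] := by
    simp [PySem.List.pyGet?_eq_none_iff, PySem.Raise.InRange] at hg
    have hlen := String.length_toList (s := el)
    cases hel : el.toList with
    | nil => rfl
    | cons a as =>
      exfalso; rw [hel] at hlen; simp at hlen; omega
  simp [PySem.Int.ofStr?, PySem.Str.slice, hnil]
  decide

theorem pvTot_h (hs ms ss : List Int) (v : Int) :
    pvTot (hs ++ [v]) ms ss = pvTot hs ms ss + v * 3600 := by
  simp [pvTot, List.sum_append]; ring

theorem pvTot_m (hs ms ss : List Int) (v : Int) :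
    pvTot hs (ms ++ [v]) ss = pvTot hs ms ss + v * 60 := by
  simp [pvTot, List.sum_append]; ring

theorem pvTot_s (hs ms ss : List Int) (v : Int) :
    pvTot hs ms (ss ++ [v]) = pvTot hs ms ss + v := by
  simp [pvTot, List.sum_append]; ring

theorem pv_inner_rel (els : List String) : ∀ hs ms ss : List Int,
    (pvAInner els (pvSt hs ms ss) = none ∧ pvBInner els (pvTot hs ms ss) = none) ∨
    (∃ hs' ms' ss', pvAInner els (pvSt hs ms ss) = some (pvSt hs' ms' ss') ∧
       pvBInner els (pvTot hs ms ss) = some (pvTot hs' ms' ss')) := by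
  induction els with
  | nil => intro hs ms ss; right; exact ⟨hs, ms, ss, rfl, rfl⟩
  | cons el es ih =>
    intro hs ms ss
    cases hg : PySem.List.pyGet? el.toList (-1) with
    | none =>
      left
      refine ⟨by simp [pvAInner, hg], by simp [pvBInner, pv_empty_tok el hg]⟩
    | some c =>
      cases hv : PySem.Int.ofStr? (PySem.Str.slice el (some 0) (some (-1))) with
      | none =>
        left
        refine ⟨?_, by simp [pvBInner, hv]⟩
        cases hq : (pvSt hs ms ss).get? (String.ofList [c]) with
        | none => simp [pvAInner, hg, hq]
        | some lst => simp [pvAInner, hg, hq, hv]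
      | some v =>
        by_cases h1 : c = 'h'
        · subst h1
          have hA : pvAInner (el :: es) (pvSt hs ms ss) = pvAInner es (pvSt (hs ++ [v]) ms ss) := by
            simp [pvAInner, hg, hv, pvSt_get_h, show String.ofList ['h'] = "h" from rfl, pvSt_ins_h]
          have hB : pvBInner (el :: es) (pvTot hs ms ss) = pvBInner es (pvTot (hs ++ [v]) ms ss) := by
            simp [pvBInner, hg, hv, pvMULT_get_h, show String.ofList ['h'] = "h" from rfl]
            rw [pvTot_h]
          rw [hA, hB]; exact ih (hs ++ [v]) ms ss
        · by_cases h2 : c = 'm'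
          · subst h2
            have hA : pvAInner (el :: es) (pvSt hs ms ss) = pvAInner es (pvSt hs (ms ++ [v]) ss) := by
              simp [pvAInner, hg, hv, pvSt_get_m, show String.ofList ['m'] = "m" from rfl, pvSt_ins_m]
            have hB : pvBInner (el :: es) (pvTot hs ms ss) = pvBInner es (pvTot hs (ms ++ [v]) ss) := by
              simp [pvBInner, hg, hv, pvMULT_get_m, show String.ofList ['m'] = "m" from rfl]
              rw [pvTot_m]
            rw [hA, hB]; exact ih hs (ms ++ [v]) ss
          · by_cases h3 : c = 's'
            · subst h3
              have hA : pvAInner (el :: es) (pvSt hs ms ss) = pvAInner es (pvSt hs ms (ss ++ [v])) := by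
                simp [pvAInner, hg, hv, pvSt_get_s, show String.ofList ['s'] = "s" from rfl, pvSt_ins_s]
              have hB : pvBInner (el :: es) (pvTot hs ms ss) = pvBInner es (pvTot hs ms (ss ++ [v])) := by
                simp [pvBInner, hg, hv, pvMULT_get_s, show String.ofList ['s'] = "s" from rfl]
                rw [pvTot_s]
              rw [hA, hB]; exact ih hs ms (ss ++ [v])
            · left
              refine ⟨?_, ?_⟩
              · simp [pvAInner, hg, pvSt_get?, h1, h2, h3]
              · simp [pvBInner, hv, hg, pvMULT_get?, h1, h2, h3]

theorem pv_outer_rel (lins : List String) : ∀ hs ms ss : List Int,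
    (pvAOuter (lins.map (fun l => pvSplit (PySem.Str.strip l) " ")) (pvSt hs ms ss) = none ∧
       pvBOuter lins (pvTot hs ms ss) = none) ∨
    (∃ hs' ms' ss',
       pvAOuter (lins.map (fun l => pvSplit (PySem.Str.strip l) " ")) (pvSt hs ms ss) =
         some (pvSt hs' ms' ss') ∧
       pvBOuter lins (pvTot hs ms ss) = some (pvTot hs' ms' ss')) := by
  induction lins with
  | nil => intro hs ms ss; right; exact ⟨hs, ms, ss, rfl, rfl⟩
  | cons lin rest ih =>
    intro hs ms ss
    rcases pv_inner_rel (pvSplit (PySem.Str.strip lin) " ") hs ms ss with ⟨ha, hb⟩ | ⟨hs', ms', ss', ha, hb⟩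
    · left
      exact ⟨by simp [pvAOuter, ha], by simp [pvBOuter, hb]⟩
    · rcases ih hs' ms' ss' with ⟨ha2, hb2⟩ | ⟨hs'', ms'', ss'', ha2, hb2⟩
      · left
        exact ⟨by simp [pvAOuter, ha, ha2], by simp [pvBOuter, hb, hb2]⟩
      · right
        exact ⟨hs'', ms'', ss'', by simp [pvAOuter, ha, ha2], by simp [pvBOuter, hb, hb2]⟩

theorem pvSt_getD_h (hs ms ss : List Int) :
    (PySem.Dict.ofList [("h", hs), ("m", ms), ("s", ss)]).getD "h" [] = hs := rfl
theorem pvSt_getD_m (hs ms ss : List Int) :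
    (PySem.Dict.ofList [("h", hs), ("m", ms), ("s", ss)]).getD "m" [] = ms := rfl
theorem pvSt_getD_s (hs ms ss : List Int) :
    (PySem.Dict.ofList [("h", hs), ("m", ms), ("s", ss)]).getD "s" [] = ss := rfl

-- ===== VERDICT (by name: the statement is the Claim_ definition above) =====
theorem sumar_tiempos_spec : Claim_equal_sumar_tiempos := by
  intro t _
  unfold Spec_sumar_tiempos sumar_tiempos sumar_tiempos_alt
  rcases pv_outer_rel (pvSplit (PySem.Str.strip t) "\n") [] [] [] with ⟨ha, hb⟩ | ⟨hs, ms, ss, ha, hb⟩ <;>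
      simp only [pvSt] at ha <;>
      rw [show pvTot [] [] [] = 0 from rfl] at hb
  · simp only [ha, hb]
  · simp only [ha, hb, pvTot]
    simp only [pvSt_getD_h, pvSt_getD_m, pvSt_getD_s, PySem.Int.mod, PySem.Int.floordiv]
    have e1 : Int.fmod ss.sum 60 = Int.fmod (Int.fmod (3600 * hs.sum + 60 * ms.sum + ss.sum) 3600) 60 := by
      rw [Int.fmod_eq_emod, Int.fmod_eq_emod, Int.fmod_eq_emod]
      simp only [show ((0:Int) ≤ 60) = True from by simp, show ((0:Int) ≤ 3600) = True from by simp,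
        true_or, if_pos trivial]
      omega
    have e2 : Int.fmod (ms.sum + Int.fdiv ss.sum 60) 60
        = Int.fdiv (Int.fmod (3600 * hs.sum + 60 * ms.sum + ss.sum) 3600) 60 := by
      rw [Int.fmod_eq_emod, Int.fmod_eq_emod, Int.fdiv_eq_ediv, Int.fdiv_eq_ediv]
      simp only [show ((0:Int) ≤ 60) = True from by simp, show ((0:Int) ≤ 3600) = True from by simp,
        true_or, if_pos trivial]
      omega
    have e3 : hs.sum + Int.fdiv (ms.sum + Int.fdiv ss.sum 60) 60
        = Int.fdiv (3600 * hs.sum + 60 * ms.sum + ss.sum) 3600 := by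
      rw [Int.fdiv_eq_ediv, Int.fdiv_eq_ediv, Int.fdiv_eq_ediv]
      simp only [show ((0:Int) ≤ 60) = True from by simp, show ((0:Int) ≤ 3600) = True from by simp,
        true_or, if_pos trivial]
      omega
    rw [e1, e2, e3]
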